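-- pv_equiv track=rewrite | github.com/Forelow/NAISC | app/ai/config_guard.py | find_uncovered_leaf_repeated_paths
-- ===== SOURCE A (Python) =====
-- from typing import Any
--
-- def _normalize_path_syntax(path: str) -> str:
--     if not path:
--         return path
--
--     path = path.strip()
--
--     # Convert slash-style paths to dot-style
--     path = path.replace("\\", "/")
--     path = path.replace("/", ".")
--
--     # Root-array handling
--     # []        -> $[]
--     # [].field  -> $[].field
--     if path == "[]":
--         path = "$[]"
--     elif path.startswith("[]."):
--         path = "$" + path
--
--     # Clean leading dots from converted slash paths
--     path = path.lstrip(".")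
--
--     # Normalize list syntax
--     path = path.replace(".[]", "[]")
--
--     while ".." in path:
--         path = path.replace("..", ".")
--
--     return path
--
-- def find_uncovered_leaf_repeated_paths(
--     structure_summary: dict[str, Any],
--     config: dict[str, Any],
-- ) -> list[str]:
--     """
--     Return repeated paths from the structure summary that:
--     - are leaf repeated paths (they do not contain another repeated path beneath them)
--     - are not currently covered by any record group path
--     """
--     repeated_paths = [
--         _normalize_path_syntax(p)
--         for p in structure_summary.get("repeated_paths", [])
--         if p
--     ]
--
--     leaf_paths = []
--     for path in repeated_paths:
--         is_parent_of_other_repeated = any(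
--             other != path and other.startswith(path + ".")
--             for other in repeated_paths
--         )
--         if not is_parent_of_other_repeated:
--             leaf_paths.append(path)
--
--     covered_group_paths = {
--         _normalize_path_syntax(group.get("path", ""))
--         for group in config.get("record_groups", [])
--     }
--
--     uncovered = [path for path in leaf_paths if path not in covered_group_paths]
--     return uncovered
-- ===== SOURCE B (Python) =====
-- def _normalize_path_syntax(path: str) -> str:
--     if not path:
--         return path
--     path = path.strip()
--     path = path.replace("\\", "/")
--     path = path.replace("/", ".")
--     if path == "[]":
--         path = "$[]"
--     elif path.startswith("[]."):
--         path = "$" + path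
--     path = path.lstrip(".")
--     path = path.replace(".[]", "[]")
--     while ".." in path:
--         path = path.replace("..", ".")
--     return path
--
--
-- def _dot_prefixes(p: str) -> list[str]:
--     # all proper prefixes of p that are followed by a '.'
--     return [p[:i] for i, ch in enumerate(p) if ch == "."]
--
--
-- def find_uncovered_leaf_repeated_paths(structure_summary, config):
--     repeated = [
--         _normalize_path_syntax(p)
--         for p in structure_summary.get("repeated_paths", [])
--         if p
--     ]
--     # a path is a non-leaf iff it is a dot-prefix of some repeated path
--     ancestors = set()
--     for p in repeated:
--         for q in _dot_prefixes(p):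
--             ancestors.add(q)
--     covered = {
--         _normalize_path_syntax(g.get("path", ""))
--         for g in config.get("record_groups", [])
--     }
--     return [p for p in repeated if p not in ancestors and p not in covered]
-- ===== Notes on version B (the rewrite author's own statement) =====
-- stated objective: alternative
-- what changed: Instead of the all-pairs startswith scan to detect non-leaf repeated paths, B builds one set of every dot-prefix of every repeated path and does a single membership pass; same normalization and covered-set filtering.
import Mathlib
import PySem

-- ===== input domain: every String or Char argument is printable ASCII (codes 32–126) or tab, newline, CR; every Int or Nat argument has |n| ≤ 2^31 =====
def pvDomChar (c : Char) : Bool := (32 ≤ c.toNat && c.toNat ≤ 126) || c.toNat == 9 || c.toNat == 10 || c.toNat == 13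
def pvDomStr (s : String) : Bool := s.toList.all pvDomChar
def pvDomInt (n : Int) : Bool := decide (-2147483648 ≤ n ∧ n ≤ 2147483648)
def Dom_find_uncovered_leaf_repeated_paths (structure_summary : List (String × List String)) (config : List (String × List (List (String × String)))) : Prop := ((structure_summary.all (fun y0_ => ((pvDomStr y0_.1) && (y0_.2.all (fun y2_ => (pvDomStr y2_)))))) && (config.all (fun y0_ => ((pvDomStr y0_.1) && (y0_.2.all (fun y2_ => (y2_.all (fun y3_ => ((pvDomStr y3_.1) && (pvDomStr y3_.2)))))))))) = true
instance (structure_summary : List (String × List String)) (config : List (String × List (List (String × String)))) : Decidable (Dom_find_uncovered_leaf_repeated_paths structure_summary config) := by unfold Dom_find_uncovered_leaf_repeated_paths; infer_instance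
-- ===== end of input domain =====

-- B replaces A's all-pairs startswith scan by one set of every dot-prefix of every repeated path (alternative algorithm).

-- ===== PORT A =====
-- shared helper: literal port of _normalize_path_syntax (used verbatim by both Pythons)
-- 'while ".." in path: path = path.replace("..", ".")' ported with a fuel counter; each
-- replace shortens the string, so fuel = len + 1 never runs out (the guard is re-checked each step).
def pvCollapseDots : Nat → String → String
  | 0, s => s
  | n + 1, s =>
      if PySem.Str.isIn ".." s then pvCollapseDots n (PySem.Str.replace s ".." ".") else s

def pyNormalizePathSyntax (path : String) : String :=
  if path == "" then path
  else
    let p1 := PySem.Str.strip path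
    let p2 := PySem.Str.replace p1 "\\" "/"
    let p3 := PySem.Str.replace p2 "/" "."
    let p4 := if p3 == "[]" then "$[]"
              else if PySem.Str.startswith p3 "[]." then String.ofList ('$' :: p3.toList)  -- "$" + path
              else p3
    -- path.lstrip("."): drop the leading '.' characters (exact; PySem has no chars-argument lstrip)
    let p5 := String.ofList (p4.toList.dropWhile (fun c => c == '.'))
    let p6 := PySem.Str.replace p5 ".[]" "[]"
    pvCollapseDots ((PySem.Str.len p6).toNat + 1) p6

def find_uncovered_leaf_repeated_paths (structure_summary : List (String × List String)) (config : List (String × List (List (String × String)))) : List String :=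
  let repeated_paths :=
    ((PySem.Dict.getD (PySem.Dict.mk structure_summary) "repeated_paths" []).filter (fun p => !(p == ""))).map
      pyNormalizePathSyntax
  let leaf_paths :=
    repeated_paths.foldl
      (fun acc path =>
        if repeated_paths.any
            (fun other => other != path &&
              PySem.Str.startswith other (String.ofList (path.toList ++ ['.'])))  -- path + "."
        then acc
        else acc ++ [path])
      []
  let covered_group_paths :=
    PySem.Set.ofList
      ((PySem.Dict.getD (PySem.Dict.mk config) "record_groups" []).map
        (fun group => pyNormalizePathSyntax (PySem.Dict.getD (PySem.Dict.mk group) "path" "")))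
  leaf_paths.filter (fun path => !(PySem.Set.contains covered_group_paths path))

-- ===== PORT B =====
-- _dot_prefixes(p): [p[:i] for i, ch in enumerate(p) if ch == "."]
def pvDotPrefixes (p : String) : List String :=
  ((PySem.List.enumerate p.toList 0).filter (fun ic => ic.2 == '.')).map
    (fun ic => PySem.Str.slice p none (some ic.1))

def find_uncovered_leaf_repeated_paths_alt (structure_summary : List (String × List String)) (config : List (String × List (List (String × String)))) : List String :=
  let repeated :=
    ((PySem.Dict.getD (PySem.Dict.mk structure_summary) "repeated_paths" []).filter (fun p => !(p == ""))).map
      pyNormalizePathSyntax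
  let ancestors :=
    repeated.foldl (fun s p => (pvDotPrefixes p).foldl PySem.Set.add s) PySem.Set.empty
  let covered :=
    PySem.Set.ofList
      ((PySem.Dict.getD (PySem.Dict.mk config) "record_groups" []).map
        (fun g => pyNormalizePathSyntax (PySem.Dict.getD (PySem.Dict.mk g) "path" "")))
  repeated.filter
    (fun p => !(PySem.Set.contains ancestors p) && !(PySem.Set.contains covered p))

-- ===== PRECONDITION & SPEC =====
def Spec_find_uncovered_leaf_repeated_paths (structure_summary : List (String × List String)) (config : List (String × List (List (String × String)))) (out : List String) : Prop := out = find_uncovered_leaf_repeated_paths_alt structure_summary config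
instance (structure_summary : List (String × List String)) (config : List (String × List (List (String × String)))) (out : List String) : Decidable (Spec_find_uncovered_leaf_repeated_paths structure_summary config out) := by unfold Spec_find_uncovered_leaf_repeated_paths; infer_instance

-- ===== CLAIM (what is proved, stated in full; the proofs are below) =====
def Claim_equal_find_uncovered_leaf_repeated_paths : Prop := ∀ (structure_summary : List (String × List String)) (config : List (String × List (List (String × String)))), Dom_find_uncovered_leaf_repeated_paths structure_summary config → Spec_find_uncovered_leaf_repeated_paths structure_summary config (find_uncovered_leaf_repeated_paths structure_summary config)

-- ===== LEMMAS AND PROOFS =====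

-- p ∈ _dot_prefixes o  ↔  o = p ++ "." ++ rest
lemma mem_pvDotPrefixes (o p : String) :
    p ∈ pvDotPrefixes o ↔ ∃ rest : List Char, o.toList = p.toList ++ '.' :: rest := by
  unfold pvDotPrefixes
  simp only [List.mem_map, List.mem_filter, PySem.List.mem_enumerate_iff]
  constructor
  · rintro ⟨⟨i, c⟩, ⟨⟨k, hk, hkeq⟩, hdot⟩, hsl⟩
    have hi : i = (k : Int) := by cases hkeq; simp
    have hc : c = o.toList[k] := by cases hkeq; rfl
    have hp : p.toList = o.toList.take k := by
      rw [← hsl, hi]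
      simp [PySem.Str.toList_slice, PySem.List.slice_to_natCast]
    refine ⟨o.toList.drop (k + 1), ?_⟩
    rw [hp]
    have hd : o.toList[k] = '.' := by
      have := hdot; rw [hc] at this; simpa using this
    rw [← hd, List.getElem_cons_drop]
    exact (List.take_append_drop k o.toList).symm
  · rintro ⟨rest, hrest⟩
    have hk : p.toList.length < o.toList.length := by rw [hrest]; simp
    have hd : o.toList[p.toList.length]'hk = '.' := by
      have h2 : o.toList[p.toList.length]'hk
          = (p.toList ++ '.' :: rest)[p.toList.length]'(by simp) := List.getElem_of_eq hrest hk
      rw [h2, List.getElem_append_right (le_refl _)]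
      simp
    refine ⟨((p.toList.length : Int), '.'), ⟨⟨p.toList.length, hk, by rw [hd]; simp⟩, by simp⟩, ?_⟩
    apply String.toList_inj.mp
    rw [PySem.Str.toList_slice]
    simp only [PySem.Chars.slice_eq_listSlice, PySem.List.slice_to_natCast]
    rw [hrest, List.take_left]

-- membership in B's nested ancestor-building loop
lemma mem_ancFold (rp : List String) (s : PySem.Set String) (x : String) :
    x ∈ rp.foldl (fun s q => (pvDotPrefixes q).foldl PySem.Set.add s) s
      ↔ x ∈ s ∨ ∃ o ∈ rp, x ∈ pvDotPrefixes o := by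
  induction rp generalizing s with
  | nil => simp
  | cons q t ih =>
    simp only [List.foldl_cons, ih]
    rw [show ((pvDotPrefixes q).foldl PySem.Set.add s)
          = (pvDotPrefixes q).foldl (fun s b => PySem.Set.add s (id b)) s from rfl,
        PySem.Set.mem_foldl_add]
    simp only [id_eq, List.mem_cons]
    constructor
    · rintro (⟨h | ⟨b, hb, rfl⟩⟩ | ⟨o, ho, hm⟩)
      · exact Or.inl h
      · exact Or.inr ⟨q, Or.inl rfl, hb⟩
      · exact Or.inr ⟨o, Or.inr ho, hm⟩
    · rintro (h | ⟨o, (rfl | ho), hm⟩)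
      · exact Or.inl (Or.inl h)
      · exact Or.inl (Or.inr ⟨x, hm, rfl⟩)
      · exact Or.inr ⟨o, ho, hm⟩

-- A's any-scan over the whole list equals membership in B's ancestor set
lemma parent_scan_eq_ancestors (rp : List String) (p : String) :
    rp.any (fun other => other != p &&
        PySem.Str.startswith other (String.ofList (p.toList ++ ['.'])))
      = PySem.Set.contains
          (rp.foldl (fun s q => (pvDotPrefixes q).foldl PySem.Set.add s) PySem.Set.empty) p := by
  rw [Bool.eq_iff_iff, List.any_eq_true, PySem.Set.contains_iff, mem_ancFold]
  have hstep : ∀ o : String,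
      ((o != p && PySem.Str.startswith o (String.ofList (p.toList ++ ['.']))) = true)
        ↔ ∃ rest : List Char, o.toList = p.toList ++ '.' :: rest := by
    intro o
    rw [Bool.and_eq_true, PySem.Str.startswith_eq]
    constructor
    · rintro ⟨-, hsw⟩
      obtain ⟨t, ht⟩ := (PySem.Chars.startswith_iff _ _).mp (by simpa using hsw)
      exact ⟨t, by rw [← ht]; simp⟩
    · rintro ⟨rest, hrest⟩
      refine ⟨?_, ?_⟩
      · simp only [bne_iff_ne, ne_eq]
        intro h
        subst h
        simpa using congrArg List.length hrest
      · apply (PySem.Chars.startswith_iff _ _).mpr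
        refine ⟨rest, ?_⟩
        rw [hrest]
        simp
  constructor
  · rintro ⟨o, ho, h⟩
    obtain ⟨rest, hrest⟩ := (hstep o).mp h
    exact Or.inr ⟨o, ho, (mem_pvDotPrefixes o p).mpr ⟨rest, hrest⟩⟩
  · rintro (h | ⟨o, ho, hm⟩)
    · simp [PySem.Set.empty] at h
    · exact ⟨o, ho, (hstep o).mpr ((mem_pvDotPrefixes o p).mp hm)⟩

-- A's leaf loop (append unless some other path extends it) is a filter
lemma foldl_skip_if_eq_filter_not (p : String → Bool) (rp : List String) :
    rp.foldl (fun acc path => if p path then acc else acc ++ [path]) []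
      = rp.filter (fun x => !p x) := by
  have hfun : (fun (acc : List String) path => if p path then acc else acc ++ [path])
      = (fun acc path => if !p path then acc ++ [path] else acc) := by
    funext acc path
    cases h : p path <;> simp
  rw [hfun]
  have h := PySem.List.foldl_append_if (p := fun x => !p x) (f := id) (l := rp) []
  simpa using h

-- ===== VERDICT (by name: the statement is the Claim_ definition above) =====
theorem find_uncovered_leaf_repeated_paths_spec : Claim_equal_find_uncovered_leaf_repeated_paths := by
  intro structure_summary config _dom
  unfold Spec_find_uncovered_leaf_repeated_paths
  unfold find_uncovered_leaf_repeated_paths find_uncovered_leaf_repeated_paths_alt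
  dsimp only
  rw [foldl_skip_if_eq_filter_not, List.filter_filter]
  apply List.filter_congr
  intro p _
  rw [parent_scan_eq_ancestors, Bool.and_comm]
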